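-- pv_equiv track=rewrite | github.com/jbkamp/repo-Rob-Token-AUR | AURC-master/clean_enrich.py | retrieve_train_dev_test_sentences
-- ===== SOURCE A (Python) =====
-- def retrieve_train_dev_test_sentences(dataset_dict,domain):
--     train_sentences = set()
--     dev_sentences = set()
--     test_sentences = set()
--     for topic, list_of_examples in dataset_dict.items():
--         for x in list_of_examples:
--             if x[domain] == "Train":
--                 train_sentences.add(x["sentence"])
--             elif x[domain] == "Dev":
--                 dev_sentences.add(x["sentence"])
--             elif x[domain] == "Test":
--                 test_sentences.add(x["sentence"])
--     return train_sentences,dev_sentences,test_sentences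
-- ===== SOURCE B (Python) =====
-- def retrieve_train_dev_test_sentences(dataset_dict, domain):
--     examples = [x for exs in dataset_dict.values() for x in exs]
--     train_sentences = {x["sentence"] for x in examples if x[domain] == "Train"}
--     dev_sentences = {x["sentence"] for x in examples if x[domain] == "Dev"}
--     test_sentences = {x["sentence"] for x in examples if x[domain] == "Test"}
--     return train_sentences, dev_sentences, test_sentences
-- ===== Notes on version B (the rewrite author's own statement) =====
-- stated objective: idiomatic
-- what changed: B first flattens all examples into one list, then builds each split with its own label-specific set comprehension (three independent passes), instead of A's single interleaved nested loop maintaining three sets at once.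
import Mathlib
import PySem

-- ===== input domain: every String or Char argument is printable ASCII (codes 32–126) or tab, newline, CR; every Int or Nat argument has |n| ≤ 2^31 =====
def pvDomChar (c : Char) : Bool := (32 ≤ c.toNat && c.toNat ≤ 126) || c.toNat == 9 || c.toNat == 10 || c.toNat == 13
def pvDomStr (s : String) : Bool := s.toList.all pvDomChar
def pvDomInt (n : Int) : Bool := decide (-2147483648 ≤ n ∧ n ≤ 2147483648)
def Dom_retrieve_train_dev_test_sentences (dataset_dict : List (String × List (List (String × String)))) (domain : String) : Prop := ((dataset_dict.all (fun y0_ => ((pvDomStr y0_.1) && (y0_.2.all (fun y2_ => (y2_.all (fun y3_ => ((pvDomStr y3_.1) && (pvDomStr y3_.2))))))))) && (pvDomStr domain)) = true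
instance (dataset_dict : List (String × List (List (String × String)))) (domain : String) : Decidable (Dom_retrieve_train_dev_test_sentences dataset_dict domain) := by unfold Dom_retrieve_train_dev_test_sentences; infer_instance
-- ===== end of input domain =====

-- B flattens all examples once and builds each split with its own label-specific set comprehension,
-- instead of A's single interleaved nested loop over three accumulators (objective: idiomatic).

-- ===== PORT A =====
def retrieve_train_dev_test_sentences (dataset_dict : List (String × List (List (String × String)))) (domain : String) : List String × List String × List String :=
  -- train_sentences = set(); dev_sentences = set(); test_sentences = set()
  -- for topic, list_of_examples in dataset_dict.items(): for x in list_of_examples: …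
  dataset_dict.foldl
    (fun st p =>
      p.2.foldl
        (fun st x =>
          if (PySem.Dict.mk x).getD domain "" = "Train" then
            (PySem.Set.add st.1 ((PySem.Dict.mk x).getD "sentence" ""), st.2.1, st.2.2)
          else if (PySem.Dict.mk x).getD domain "" = "Dev" then
            (st.1, PySem.Set.add st.2.1 ((PySem.Dict.mk x).getD "sentence" ""), st.2.2)
          else if (PySem.Dict.mk x).getD domain "" = "Test" then
            (st.1, st.2.1, PySem.Set.add st.2.2 ((PySem.Dict.mk x).getD "sentence" ""))
          else st)
        st)
    (PySem.Set.empty, PySem.Set.empty, PySem.Set.empty)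

-- ===== PORT B =====
def retrieve_train_dev_test_sentences_alt (dataset_dict : List (String × List (List (String × String)))) (domain : String) : List String × List String × List String :=
  -- examples = [x for exs in dataset_dict.values() for x in exs]
  let examples := dataset_dict.flatMap (fun p => p.2)
  -- {x["sentence"] for x in examples if x[domain] == <label>}, one comprehension per label
  (PySem.Set.ofList ((examples.filter (fun x => (PySem.Dict.mk x).getD domain "" == "Train")).map (fun x => (PySem.Dict.mk x).getD "sentence" "")),
   PySem.Set.ofList ((examples.filter (fun x => (PySem.Dict.mk x).getD domain "" == "Dev")).map (fun x => (PySem.Dict.mk x).getD "sentence" "")),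
   PySem.Set.ofList ((examples.filter (fun x => (PySem.Dict.mk x).getD domain "" == "Test")).map (fun x => (PySem.Dict.mk x).getD "sentence" "")))

-- ===== PRECONDITION & SPEC =====
-- Pre_ excludes exactly the inputs where the Python A raises KeyError: an example missing the
-- domain key, or an example labelled Train/Dev/Test missing the "sentence" key.
def Pre_retrieve_train_dev_test_sentences (dataset_dict : List (String × List (List (String × String)))) (domain : String) : Prop :=
  ∀ p ∈ dataset_dict, ∀ x ∈ p.2,
    ((PySem.Dict.mk x).get? domain).isSome ∧
    ((PySem.Dict.mk x).getD domain "" ∈ (["Train", "Dev", "Test"] : List String) →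
      ((PySem.Dict.mk x).get? "sentence").isSome)
instance (dataset_dict : List (String × List (List (String × String)))) (domain : String) : Decidable (Pre_retrieve_train_dev_test_sentences dataset_dict domain) := by unfold Pre_retrieve_train_dev_test_sentences; infer_instance
def pvWitness_retrieve_train_dev_test_sentences : (List (String × List (List (String × String)))) × String :=
  ([("t1", [[("d", "Train"), ("sentence", "s1")], [("d", "Dev"), ("sentence", "s2")]]),
    ("t2", [[("d", "Test"), ("sentence", "s3")], [("d", "Other"), ("sentence", "s4")]])], "d")

def Spec_retrieve_train_dev_test_sentences (dataset_dict : List (String × List (List (String × String)))) (domain : String) (out : List String × List String × List String) : Prop := out = retrieve_train_dev_test_sentences_alt dataset_dict domain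
instance (dataset_dict : List (String × List (List (String × String)))) (domain : String) (out : List String × List String × List String) : Decidable (Spec_retrieve_train_dev_test_sentences dataset_dict domain out) := by unfold Spec_retrieve_train_dev_test_sentences; infer_instance

-- ===== CLAIM (what is proved, stated in full; the proofs are below) =====
def Claim_equal_retrieve_train_dev_test_sentences : Prop := ∀ (dataset_dict : List (String × List (List (String × String)))) (domain : String), Dom_retrieve_train_dev_test_sentences dataset_dict domain → Pre_retrieve_train_dev_test_sentences dataset_dict domain → Spec_retrieve_train_dev_test_sentences dataset_dict domain (retrieve_train_dev_test_sentences dataset_dict domain)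

-- ===== LEMMAS AND PROOFS =====

-- the sentences B's comprehension for label `lbl` draws from a list of examples
def pvSel (domain lbl : String) (xs : List (List (String × String))) : List String :=
  (xs.filter (fun x => (PySem.Dict.mk x).getD domain "" == lbl)).map (fun x => (PySem.Dict.mk x).getD "sentence" "")

theorem pvSel_append (domain lbl : String) (xs ys : List (List (String × String))) :
    pvSel domain lbl (xs ++ ys) = pvSel domain lbl xs ++ pvSel domain lbl ys := by
  simp [pvSel]

-- the inner loop body of A, over one flat list of examples, computes B's three updates
theorem pvInner (domain : String) (xs : List (List (String × String)))
    (tr dv te : PySem.Set String) :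
    xs.foldl
      (fun st x =>
        if (PySem.Dict.mk x).getD domain "" = "Train" then
          (PySem.Set.add st.1 ((PySem.Dict.mk x).getD "sentence" ""), st.2.1, st.2.2)
        else if (PySem.Dict.mk x).getD domain "" = "Dev" then
          (st.1, PySem.Set.add st.2.1 ((PySem.Dict.mk x).getD "sentence" ""), st.2.2)
        else if (PySem.Dict.mk x).getD domain "" = "Test" then
          (st.1, st.2.1, PySem.Set.add st.2.2 ((PySem.Dict.mk x).getD "sentence" ""))
        else st)
      (tr, dv, te)
    = (PySem.Set.update tr (pvSel domain "Train" xs),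
       PySem.Set.update dv (pvSel domain "Dev" xs),
       PySem.Set.update te (pvSel domain "Test" xs)) := by
  induction xs generalizing tr dv te with
  | nil => simp [pvSel, PySem.Set.update]
  | cons x xs ih =>
    by_cases h1 : (PySem.Dict.mk x).getD domain "" = "Train"
    · simp [pvSel, h1, ih, PySem.Set.update_cons]
    · by_cases h2 : (PySem.Dict.mk x).getD domain "" = "Dev"
      · simp [pvSel, h2, ih, PySem.Set.update_cons]
      · by_cases h3 : (PySem.Dict.mk x).getD domain "" = "Test"
        · simp [pvSel, h3, ih, PySem.Set.update_cons]
        · simp [pvSel, h1, h2, h3, ih]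

theorem pvOuter (domain : String) (dd : List (String × List (List (String × String))))
    (tr dv te : PySem.Set String) :
    dd.foldl
      (fun st p =>
        p.2.foldl
          (fun st x =>
            if (PySem.Dict.mk x).getD domain "" = "Train" then
              (PySem.Set.add st.1 ((PySem.Dict.mk x).getD "sentence" ""), st.2.1, st.2.2)
            else if (PySem.Dict.mk x).getD domain "" = "Dev" then
              (st.1, PySem.Set.add st.2.1 ((PySem.Dict.mk x).getD "sentence" ""), st.2.2)
            else if (PySem.Dict.mk x).getD domain "" = "Test" then
              (st.1, st.2.1, PySem.Set.add st.2.2 ((PySem.Dict.mk x).getD "sentence" ""))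
            else st)
          st)
      (tr, dv, te)
    = (PySem.Set.update tr (pvSel domain "Train" (dd.flatMap (fun p => p.2))),
       PySem.Set.update dv (pvSel domain "Dev" (dd.flatMap (fun p => p.2))),
       PySem.Set.update te (pvSel domain "Test" (dd.flatMap (fun p => p.2)))) := by
  induction dd generalizing tr dv te with
  | nil => simp [pvSel, PySem.Set.update]
  | cons p dd ih =>
    rw [List.foldl_cons, pvInner, ih]
    simp [List.flatMap_cons, pvSel_append, PySem.Set.update_append]

-- ===== VERDICT (by name: the statement is the Claim_ definition above) =====
theorem retrieve_train_dev_test_sentences_spec : Claim_equal_retrieve_train_dev_test_sentences := by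
  intro dd domain _ _
  unfold Spec_retrieve_train_dev_test_sentences retrieve_train_dev_test_sentences
    retrieve_train_dev_test_sentences_alt
  rw [pvOuter]
  simp [pvSel, PySem.Set.empty, PySem.Set.update_nil_left]
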